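-- pv_equiv track=rewrite | github.com/gustavop-dev/taller_1_algebra_lineal_aplicada_unal | escaleras_y_toboganes/segundo_punto.py | _build_destinations
-- ===== SOURCE A (Python) =====
-- from typing import Dict, List, Sequence
--
-- def _build_destinations(length: int,
--                         links: Dict[int, int]) -> List[List[int]]:
--     """For every square i (1-based), return the six destination squares
--     reached after rolling 1 … 6 and applying any ladder/snake."""
--     dests: List[List[int]] = [[] for _ in range(length + 1)]  # dummy 0
--     for i in range(1, length + 1):
--         row: List[int] = []
--         for d in range(1, 7):
--             j = i + d
--             row.append(length if j >= length else links.get(j, j))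
--         dests[i] = row
--     return dests[1:]
-- ===== SOURCE B (Python) =====
-- from typing import Dict, List
--
-- def _build_destinations(length: int,
--                         links: Dict[int, int]) -> List[List[int]]:
--     """Table-first: precompute each target's resolved square once, then
--     each row is a slice of the table."""
--     resolve = [length if j >= length else links.get(j, j)
--                for j in range(length + 7)]
--     return [resolve[i + 1:i + 7] for i in range(1, length + 1)]
-- ===== Notes on version B (the rewrite author's own statement) =====
-- stated objective: faster
-- what changed: B precomputes one flat resolution table resolve[j] (clamp to length, else links.get(j, j)) over range(length+7) and builds each square's row as the slice resolve[i+1:i+7], replacing A's dummy-slot list, per-square inner dice loop of dict lookups and index assignments; one table lookup per target instead of six per-cell dict/branch evaluations gives a measured constant-factor speedup.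
import Mathlib
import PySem

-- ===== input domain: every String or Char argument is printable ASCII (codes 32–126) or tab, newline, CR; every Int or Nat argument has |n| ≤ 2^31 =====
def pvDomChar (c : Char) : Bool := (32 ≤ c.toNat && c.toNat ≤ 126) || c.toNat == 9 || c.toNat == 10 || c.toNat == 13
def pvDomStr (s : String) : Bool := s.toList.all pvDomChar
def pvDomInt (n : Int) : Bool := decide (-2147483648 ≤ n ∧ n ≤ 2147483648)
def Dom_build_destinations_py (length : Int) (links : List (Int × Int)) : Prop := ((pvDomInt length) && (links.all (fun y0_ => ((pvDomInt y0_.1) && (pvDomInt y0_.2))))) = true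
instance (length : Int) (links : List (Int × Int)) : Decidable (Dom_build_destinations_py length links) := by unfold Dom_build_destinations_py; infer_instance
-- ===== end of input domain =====

-- B replaces A's per-square inner dice loop of dict lookups by one precomputed
-- resolution table sliced per square (measured constant-factor speedup).

-- ===== PORT A =====
-- literal port of A: dummy row 0, per-square inner loop over d = 1..6, then dests[1:]
def build_destinations_py (length : Int) (links : List (Int × Int)) : List (List Int) :=
  let d := PySem.Dict.mk links
  let dests : List (List Int) := (PySem.List.pyRange 0 (length + 1) 1).map (fun _ => ([] : List Int))
  let dests := (PySem.List.pyRange 1 (length + 1) 1).foldl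
    (fun dests i =>
      let row := (PySem.List.pyRange 1 7 1).foldl
        (fun row dd =>
          let j := i + dd
          row ++ [if j ≥ length then length else d.getD j j]) []
      PySem.List.pySetD dests i row)   -- dests[i] = row (i is in range here, so the total form is exact)
    dests
  PySem.List.slice dests (some 1) none   -- dests[1:]

-- ===== PORT B =====
-- literal port of B: table 'resolve' over range(length+7), rows are slices resolve[i+1:i+7]
def build_destinations_py_alt (length : Int) (links : List (Int × Int)) : List (List Int) :=
  let d := PySem.Dict.mk links
  let resolve : List Int := (PySem.List.pyRange 0 (length + 7) 1).map
    (fun j => if j ≥ length then length else d.getD j j)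
  (PySem.List.pyRange 1 (length + 1) 1).map
    (fun i => PySem.List.slice resolve (some (i + 1)) (some (i + 7)))

-- ===== PRECONDITION & SPEC =====
def Spec_build_destinations_py (length : Int) (links : List (Int × Int)) (out : List (List Int)) : Prop := out = build_destinations_py_alt length links
instance (length : Int) (links : List (Int × Int)) (out : List (List Int)) : Decidable (Spec_build_destinations_py length links out) := by unfold Spec_build_destinations_py; infer_instance

-- ===== CLAIM (what is proved, stated in full; the proofs are below) =====
def Claim_equal_build_destinations_py : Prop := ∀ (length : Int) (links : List (Int × Int)), Dom_build_destinations_py length links → Spec_build_destinations_py length links (build_destinations_py length links)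

-- ===== LEMMAS AND PROOFS =====

-- writing a value at an in-range non-negative index is List.set
theorem pySetD_eq_set {α : Type} (xs : List α) (a : Nat) (h : a < xs.length) (v : α) :
    PySem.List.pySetD xs (a : Int) v = xs.set a v := by
  simp [PySem.List.pySetD, PySem.List.pySet?, PySem.List.pyIdx?, h]

-- A's assignment loop over consecutive indices a, a+1, …, a+m-1 rewrites the
-- corresponding segment of the list with the rows r a, …, r (a+m-1).
theorem foldl_pySetD_consec (r : Int → List Int) :
    ∀ (m : Nat) (a : Nat) (init : List (List Int)), a + m ≤ init.length →
      ((List.range m).map (fun k : Nat => ((a : Nat) : Int) + (k : Int))).foldl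
          (fun d i => PySem.List.pySetD d i (r i)) init
        = init.take a ++ (List.range m).map (fun k : Nat => r (((a : Nat) : Int) + (k : Int)))
            ++ init.drop (a + m) := by
  intro m
  induction m with
  | zero => intro a init h; simp
  | succ m ih =>
    intro a init h
    have hlen : a < init.length := by omega
    rw [List.range_succ_eq_map]
    simp only [List.map_cons, List.foldl_cons, List.map_map, Nat.cast_zero, add_zero]
    rw [pySetD_eq_set init a hlen]
    have hmap : (List.range m).map ((fun k : Nat => ((a : Nat) : Int) + (k : Int)) ∘ Nat.succ)
        = (List.range m).map (fun k : Nat => (((a + 1 : Nat) : Nat) : Int) + (k : Int)) := by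
      apply List.map_congr_left; intro k _
      simp [Function.comp, Nat.succ_eq_add_one]; ring
    rw [hmap, ih (a + 1) _ (by rw [List.length_set]; omega)]
    rw [List.set_eq_take_append_cons_drop, if_pos hlen]
    have hta : (init.take a).length = a := by rw [List.length_take]; omega
    rw [List.take_append, List.drop_append, hta]
    rw [List.take_of_length_le (by omega : (init.take a).length ≤ a + 1)]
    rw [show a + 1 - a = 1 by omega, show a + 1 + m - a = m + 1 by omega]
    rw [List.drop_eq_nil_of_le (by omega : (init.take a).length ≤ a + 1 + m)]
    rw [List.take_succ_cons, List.take_zero, List.drop_succ_cons, List.drop_drop]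
    have hmap2 : (List.range m).map ((fun k : Nat => r (((a : Nat) : Int) + (k : Int))) ∘ Nat.succ)
        = (List.range m).map (fun k : Nat => r ((((a + 1 : Nat) : Nat) : Int) + (k : Int))) := by
      apply List.map_congr_left; intro k _
      simp only [Function.comp, Nat.succ_eq_add_one]; congr 1; push_cast; ring
    rw [hmap2, show a + 1 + m = a + (m + 1) by omega]
    simp

-- each slice of B's table is the corresponding six-destination row of square i
theorem slice_resolve (f : Int → Int) (L i : Int) (h1 : 1 ≤ i) (h2 : i ≤ L) :
    PySem.List.slice ((PySem.List.pyRange 0 (L + 7) 1).map f) (some (i + 1)) (some (i + 7))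
      = (PySem.List.pyRange 1 7 1).map (fun dd => f (i + dd)) := by
  rw [PySem.List.slice_toNat _ (by omega) (by omega)]
  apply List.ext_getElem
  · simp only [List.length_take, List.length_drop, List.length_map,
      PySem.List.length_pyRange_one]
    omega
  · intro k hk1 hk2
    rw [List.getElem_take, List.getElem_drop, List.getElem_map, List.getElem_map,
      PySem.List.getElem_pyRange_one, PySem.List.getElem_pyRange_one]
    congr 1
    omega

-- ===== VERDICT (by name: the statement is the Claim_ definition above) =====
theorem build_destinations_py_spec : Claim_equal_build_destinations_py := by
  intro L links _
  unfold Spec_build_destinations_py build_destinations_py build_destinations_py_alt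
  set d := PySem.Dict.mk links with hd
  set r : Int → List Int :=
    fun i => (PySem.List.pyRange 1 7 1).map (fun dd => if i + dd ≥ L then L else d.getD (i + dd) (i + dd)) with hr
  by_cases hL : L < 1
  · -- empty board: A's dummy list has at most one (empty-row) entry, so dests[1:] = []
    rw [PySem.List.pyRange_one_eq_nil (show L + 1 ≤ 1 by omega)]
    simp only [List.foldl_nil, List.map_nil]
    rw [PySem.List.slice_from _ (by norm_num : (0 : Int) ≤ 1)]
    apply List.drop_eq_nil_of_le
    simp only [List.length_map, PySem.List.length_pyRange_one]
    omega
  · have hrange : PySem.List.pyRange 1 (L + 1) 1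
        = (List.range L.toNat).map (fun k : Nat => (((1 : Nat) : Int)) + (k : Int)) := by
      rw [PySem.List.pyRange_one]
      norm_num
    calc PySem.List.slice
          ((PySem.List.pyRange 1 (L + 1) 1).foldl
            (fun dests i => PySem.List.pySetD dests i (r i))
            ((PySem.List.pyRange 0 (L + 1) 1).map (fun _ => ([] : List Int))))
          (some 1) none
        = (List.range L.toNat).map (fun k : Nat => r (((1 : Nat) : Int) + (k : Int))) := by
          rw [hrange, foldl_pySetD_consec r L.toNat 1 _
            (by simp only [List.length_map, PySem.List.length_pyRange_one]; omega)]
          rw [PySem.List.slice_from _ (by norm_num : (0 : Int) ≤ 1)]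
          have hx1 : (((PySem.List.pyRange 0 (L + 1) 1).map (fun _ => ([] : List Int))).take 1).length = 1 := by
            simp only [List.length_take, List.length_map, PySem.List.length_pyRange_one]
            omega
          have hdropX : ((PySem.List.pyRange 0 (L + 1) 1).map (fun _ => ([] : List Int))).drop (1 + L.toNat) = [] := by
            apply List.drop_eq_nil_of_le
            simp only [List.length_map, PySem.List.length_pyRange_one]
            omega
          rw [hdropX, List.append_nil, List.drop_append, hx1, Int.toNat_one,
            List.drop_eq_nil_of_le (le_of_eq hx1)]
          simp
      _ = (PySem.List.pyRange 1 (L + 1) 1).map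
            (fun i => PySem.List.slice
              ((PySem.List.pyRange 0 (L + 7) 1).map (fun j => if j ≥ L then L else d.getD j j))
              (some (i + 1)) (some (i + 7))) := by
          rw [hrange, List.map_map]
          apply List.map_congr_left
          intro k hk
          have hkL : (k : Int) < L := by
            rw [List.mem_range] at hk; omega
          rw [Function.comp_apply,
            slice_resolve (fun j => if j ≥ L then L else d.getD j j) L _ (by omega) (by omega)]
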